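-- pv_equiv track=rewrite | github.com/yu-hao123/async-classifier | asynchronyClassifier/classify.py | find_ineffective_effort
-- ===== SOURCE A (Python) =====
-- def find_ineffective_effort(ins_marks, exp_marks, pmus_start_marks, pmus_finish_marks):
--     indexes = []
--     for i in range(len(pmus_start_marks)):
--         detected = True
--         if (i >= len(pmus_finish_marks)):
--             break
--         for j in range(len(ins_marks)):
--             if (ins_marks[j] > pmus_start_marks[i] and \
--                 ins_marks[j] < pmus_finish_marks[i]
--                 ):
--                 detected = False
--             if (j < len(exp_marks) and \
--                 exp_marks[j] > pmus_start_marks[i] and \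
--                 exp_marks[j] < pmus_finish_marks[i]
--                 ):
--                 detected = False
--
--             # if pmus effort is in the inspiration part of the flow cycle
--             # there is not IEE
--             if (j >= len(exp_marks) and ins_marks[j] < pmus_start_marks[i]):
--                 detected = False
--             elif (ins_marks[j] < pmus_start_marks[i] and \
--                   exp_marks[j] > pmus_start_marks[i]
--                   ):
--                 detected = False
--
--         if (detected):
--             indexes.append(pmus_start_marks[i])
--     return indexes
-- ===== SOURCE B (Python) =====
-- # Faster exact re-implementation: sort the marks once, then answer each
-- # (start, finish) interval with binary searches over the sorted arrays
-- # plus a prefix-maximum table, instead of rescanning all marks per start.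
--
-- def _bisect_right(a, x):
--     lo = 0
--     hi = len(a)
--     while lo < hi:
--         mid = (lo + hi) // 2
--         if a[mid] <= x:
--             lo = mid + 1
--         else:
--             hi = mid
--     return lo
--
--
-- def _bisect_left(a, x):
--     lo = 0
--     hi = len(a)
--     while lo < hi:
--         mid = (lo + hi) // 2
--         if a[mid] < x:
--             lo = mid + 1
--         else:
--             hi = mid
--     return lo
--
--
-- def _has_between(sl, lo, hi):
--     # sl sorted ascending: is there an element strictly between lo and hi?
--     i = _bisect_right(sl, lo)
--     return i < len(sl) and sl[i] < hi
--
--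
-- def find_ineffective_effort(ins_marks, exp_marks, pmus_start_marks, pmus_finish_marks):
--     n = len(ins_marks)
--     e = len(exp_marks)
--     sorted_ins = sorted(ins_marks)
--     exp_pref = sorted(exp_marks[:n])
--     tail = ins_marks[e:]
--     tail_min = min(tail) if tail else None
--     pairs = sorted(zip(ins_marks, exp_marks), key=lambda p: p[0])
--     firsts = [p[0] for p in pairs]
--     pm = []
--     cur = None
--     for _, b in pairs:
--         cur = b if cur is None or b > cur else cur
--         pm.append(cur)
--     out = []
--     for s, f in zip(pmus_start_marks, pmus_finish_marks):
--         if _has_between(sorted_ins, s, f):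
--             continue
--         if _has_between(exp_pref, s, f):
--             continue
--         if tail_min is not None and tail_min < s:
--             continue
--         k = _bisect_left(firsts, s)
--         if k > 0 and pm[k - 1] > s:
--             continue
--         out.append(s)
--     return out
-- ===== Notes on version B (the rewrite author's own statement) =====
-- stated objective: faster
-- what changed: Replaces the per-start rescan of all inspiration/expiration marks by one-time sorting (marks, truncated expiration marks, (ins,exp) pairs by ins with a prefix-maximum of exp) and answers each start/finish interval with hand-written binary searches.
import Mathlib
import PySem

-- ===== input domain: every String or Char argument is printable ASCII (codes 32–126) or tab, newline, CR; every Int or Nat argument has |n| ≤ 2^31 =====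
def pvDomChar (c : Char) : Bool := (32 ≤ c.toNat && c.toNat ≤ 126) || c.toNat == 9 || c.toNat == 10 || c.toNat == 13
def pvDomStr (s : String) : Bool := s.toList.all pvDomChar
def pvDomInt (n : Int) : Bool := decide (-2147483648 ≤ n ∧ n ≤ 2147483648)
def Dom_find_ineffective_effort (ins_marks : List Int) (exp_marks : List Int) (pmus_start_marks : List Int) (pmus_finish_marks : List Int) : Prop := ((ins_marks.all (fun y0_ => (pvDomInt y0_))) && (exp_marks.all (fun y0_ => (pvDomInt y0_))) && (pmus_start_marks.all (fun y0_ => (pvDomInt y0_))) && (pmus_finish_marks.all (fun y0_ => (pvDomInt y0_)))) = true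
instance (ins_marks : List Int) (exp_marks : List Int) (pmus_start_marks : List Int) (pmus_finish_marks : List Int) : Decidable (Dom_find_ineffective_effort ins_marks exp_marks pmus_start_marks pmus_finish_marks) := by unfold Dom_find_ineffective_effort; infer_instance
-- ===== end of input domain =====

-- B replaces A's per-start rescan of all marks by one-time sorting plus binary
-- searches and a prefix-maximum table (measured asymptotically faster).

-- ===== PORT A =====
-- inner 'for j in range(len(ins_marks))' loop of A, for one (start, finish) pair
def aInner (ins : List Int) (exp : List Int) (s : Int) (f : Int) : Bool :=
  (PySem.List.pyRange 0 (PySem.List.len ins) 1).foldl (fun detected j =>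
    let d1 := if PySem.List.pyGetD ins j 0 > s ∧ PySem.List.pyGetD ins j 0 < f then false else detected
    let d2 := if j < PySem.List.len exp ∧ PySem.List.pyGetD exp j 0 > s ∧ PySem.List.pyGetD exp j 0 < f then false else d1
    -- if/elif chain; the elif's 'exp_marks[j]' is only reached with j < len(exp) or ins[j] ≥ s (short circuit), so pyGetD's default is never the decider
    let d3 := if j ≥ PySem.List.len exp ∧ PySem.List.pyGetD ins j 0 < s then false
              else if PySem.List.pyGetD ins j 0 < s ∧ PySem.List.pyGetD exp j 0 > s then false
              else d2
    d3) true

-- outer 'for i in range(len(pmus_start_marks))' loop with its break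
def aOuter (ins : List Int) (exp : List Int) (starts : List Int) (fins : List Int) : List Int → List Int → List Int
  | [], acc => acc
  | i :: rest, acc =>
    if i ≥ PySem.List.len fins then acc
    else
      let s := PySem.List.pyGetD starts i 0
      let detected := aInner ins exp s (PySem.List.pyGetD fins i 0)
      aOuter ins exp starts fins rest (if detected then acc ++ [s] else acc)

def find_ineffective_effort (ins_marks : List Int) (exp_marks : List Int) (pmus_start_marks : List Int) (pmus_finish_marks : List Int) : List Int :=
  aOuter ins_marks exp_marks pmus_start_marks pmus_finish_marks
    (PySem.List.pyRange 0 (PySem.List.len pmus_start_marks) 1) []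

-- ===== PORT B =====
-- hand-written bisect loops of Source B (the bisect module may not be imported there);
-- a[mid] is only read with mid < hi ≤ len(a), so pyGetD's default is unreachable
def bsr (a : List Int) (x : Int) (lo : Nat) (hi : Nat) : Nat :=
  if lo < hi then
    let mid := (lo + hi) / 2
    if PySem.List.pyGetD a (mid : Int) 0 ≤ x then bsr a x (mid + 1) hi else bsr a x lo mid
  else lo
termination_by hi - lo
decreasing_by all_goals omega

def bsl (a : List Int) (x : Int) (lo : Nat) (hi : Nat) : Nat :=
  if lo < hi then
    let mid := (lo + hi) / 2
    if PySem.List.pyGetD a (mid : Int) 0 < x then bsl a x (mid + 1) hi else bsl a x lo mid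
  else lo
termination_by hi - lo
decreasing_by all_goals omega

def hasBetween (sl : List Int) (lo : Int) (hi : Int) : Bool :=
  let i := bsr sl lo 0 sl.length
  decide (i < sl.length) && decide (PySem.List.pyGetD sl (i : Int) 0 < hi)

-- the running-maximum loop building pm over the sorted pairs
def runMaxGo : Option Int → List (Int × Int) → List Int
  | _, [] => []
  | none, p :: r => p.2 :: runMaxGo (some p.2) r
  | some c, p :: r =>
      let c' := if p.2 > c then p.2 else c
      c' :: runMaxGo (some c') r

def find_ineffective_effort_alt (ins_marks : List Int) (exp_marks : List Int) (pmus_start_marks : List Int) (pmus_finish_marks : List Int) : List Int :=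
  let n := ins_marks.length
  let e := exp_marks.length
  let sortedIns := PySem.List.sorted ins_marks (fun x => x) false
  let expPref := PySem.List.sorted (PySem.List.slice exp_marks none (some (n : Int))) (fun x => x) false
  let tail := PySem.List.slice ins_marks (some (e : Int)) none
  let tailMin : Option Int := if tail = [] then none else PySem.List.min? tail (fun x => x)
  let pairs := PySem.List.sorted (ins_marks.zip exp_marks) (fun p => p.1) false
  let firsts := pairs.map (fun p => p.1)
  let pm := runMaxGo none pairs
  (pmus_start_marks.zip pmus_finish_marks).foldl (fun out p =>
    if hasBetween sortedIns p.1 p.2 then out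
    else if hasBetween expPref p.1 p.2 then out
    else if tailMin.isSome ∧ tailMin.getD 0 < p.1 then out
    else
      let k := bsl firsts p.1 0 firsts.length
      -- 'pm[k-1]' is guarded by k > 0 in Source B; the conjunction is false anyway when k = 0
      if 0 < k ∧ PySem.List.pyGetD pm ((k : Int) - 1) 0 > p.1 then out
      else out ++ [p.1]) []

-- ===== PRECONDITION & SPEC =====
def Spec_find_ineffective_effort (ins_marks : List Int) (exp_marks : List Int) (pmus_start_marks : List Int) (pmus_finish_marks : List Int) (out : List Int) : Prop := out = find_ineffective_effort_alt ins_marks exp_marks pmus_start_marks pmus_finish_marks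
instance (ins_marks : List Int) (exp_marks : List Int) (pmus_start_marks : List Int) (pmus_finish_marks : List Int) (out : List Int) : Decidable (Spec_find_ineffective_effort ins_marks exp_marks pmus_start_marks pmus_finish_marks out) := by unfold Spec_find_ineffective_effort; infer_instance

-- ===== CLAIM (what is proved, stated in full; the proofs are below) =====
def Claim_equal_find_ineffective_effort : Prop := ∀ (ins_marks : List Int) (exp_marks : List Int) (pmus_start_marks : List Int) (pmus_finish_marks : List Int), Dom_find_ineffective_effort ins_marks exp_marks pmus_start_marks pmus_finish_marks → Spec_find_ineffective_effort ins_marks exp_marks pmus_start_marks pmus_finish_marks (find_ineffective_effort ins_marks exp_marks pmus_start_marks pmus_finish_marks)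

-- ===== LEMMAS AND PROOFS =====

-- the combined per-index condition that clears A's 'detected' flag
def condJ (ins exp : List Int) (s f : Int) (j : Int) : Bool :=
  decide (PySem.List.pyGetD ins j 0 > s ∧ PySem.List.pyGetD ins j 0 < f) ||
  decide (j < PySem.List.len exp ∧ PySem.List.pyGetD exp j 0 > s ∧ PySem.List.pyGetD exp j 0 < f) ||
  decide (j ≥ PySem.List.len exp ∧ PySem.List.pyGetD ins j 0 < s) ||
  (!decide (j ≥ PySem.List.len exp ∧ PySem.List.pyGetD ins j 0 < s) &&
    decide (PySem.List.pyGetD ins j 0 < s ∧ PySem.List.pyGetD exp j 0 > s))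

-- the four conditions in element form
def C1 (ins : List Int) (s f : Int) : Prop := ∃ x ∈ ins, s < x ∧ x < f
def C2 (ins exp : List Int) (s f : Int) : Prop := ∃ x ∈ exp.take ins.length, s < x ∧ x < f
def C3 (ins exp : List Int) (s : Int) : Prop := ∃ x ∈ ins.drop exp.length, x < s
def C4 (ins exp : List Int) (s : Int) : Prop := ∃ p ∈ ins.zip exp, p.1 < s ∧ s < p.2

-- B's per-interval acceptance test, abstracted over the precomputed tables
def bAccept (sortedIns expPref : List Int) (tailMin : Option Int) (firsts pm : List Int)
    (s f : Int) : Bool :=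
  !hasBetween sortedIns s f && !hasBetween expPref s f &&
  !decide (tailMin.isSome ∧ tailMin.getD 0 < s) &&
  !decide (0 < bsl firsts s 0 firsts.length ∧
    PySem.List.pyGetD pm ((bsl firsts s 0 firsts.length : Int) - 1) 0 > s)

lemma foldl_and_not (p : Int → Bool) (l : List Int) (b : Bool) :
    l.foldl (fun acc j => acc && !p j) b = (b && l.all (fun j => !p j)) := by
  induction l generalizing b with
  | nil => simp
  | cons h t ih => simp [List.foldl_cons, ih, Bool.and_assoc]

lemma aInner_eq_all (ins exp : List Int) (s f : Int) :
    aInner ins exp s f = (PySem.List.pyRange 0 (PySem.List.len ins)).all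
      (fun j => !condJ ins exp s f j) := by
  unfold aInner
  rw [PySem.List.foldl_congr_mem _ _ (fun acc j => acc && !condJ ins exp s f j) true
    (by intro acc j _; simp only [condJ]; split_ifs <;> simp_all <;> (intros; omega))]
  exact foldl_and_not _ _ _

lemma exists_mem_take (l : List Int) (n : Nat) (P : Int → Prop) :
    (∃ x ∈ l.take n, P x) ↔ ∃ i, i < l.length ∧ i < n ∧ P (l.getD i 0) := by
  constructor
  · rintro ⟨x, hx, hP⟩
    rcases List.mem_iff_getElem.mp hx with ⟨i, hi, rfl⟩
    have hi' : i < l.length := lt_of_lt_of_le hi (by simp [List.length_take])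
    have hin : i < n := lt_of_lt_of_le hi (by simp [List.length_take])
    refine ⟨i, hi', hin, ?_⟩
    simpa [List.getD_eq_getElem?_getD, List.getElem?_eq_getElem, hi', List.getElem_take] using hP
  · rintro ⟨i, hil, hin, hP⟩
    refine ⟨l.getD i 0, ?_, hP⟩
    have : (l.take n)[i]'(by simp [List.length_take]; omega) = l[i] := List.getElem_take
    rw [List.getD_eq_getElem?_getD, List.getElem?_eq_getElem hil]
    exact this ▸ List.getElem_mem _
  
lemma exists_mem_drop (l : List Int) (n : Nat) (P : Int → Prop) :
    (∃ x ∈ l.drop n, P x) ↔ ∃ i, i < l.length ∧ n ≤ i ∧ P (l.getD i 0) := by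
  constructor
  · rintro ⟨x, hx, hP⟩
    rcases List.mem_iff_getElem.mp hx with ⟨i, hi, rfl⟩
    have hi' : n + i < l.length := by simp [List.length_drop] at hi; omega
    refine ⟨n + i, hi', by omega, ?_⟩
    rw [List.getD_eq_getElem?_getD, List.getElem?_eq_getElem hi']
    simpa [List.getElem_drop] using hP
  · rintro ⟨i, hil, hin, hP⟩
    refine ⟨l.getD i 0, ?_, hP⟩
    rw [List.getD_eq_getElem?_getD, List.getElem?_eq_getElem hil]
    have hlt : i - n < (l.drop n).length := by simp [List.length_drop]; omega
    have : (l.drop n)[i - n]'hlt = l[n + (i - n)]'(by omega) := List.getElem_drop ..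
    have heq : l[n + (i - n)]'(by omega) = l[i]'hil := by congr 1; omega
    exact (heq ▸ this) ▸ List.getElem_mem hlt

lemma exists_mem_zip (l₁ l₂ : List Int) (P : Int × Int → Prop) :
    (∃ p ∈ l₁.zip l₂, P p) ↔ ∃ i, i < l₁.length ∧ i < l₂.length ∧ P (l₁.getD i 0, l₂.getD i 0) := by
  constructor
  · rintro ⟨p, hp, hP⟩
    rcases List.mem_iff_getElem.mp hp with ⟨i, hi, rfl⟩
    have h1 : i < l₁.length := lt_of_lt_of_le hi (by simp [List.length_zip])
    have h2 : i < l₂.length := lt_of_lt_of_le hi (by simp [List.length_zip])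
    refine ⟨i, h1, h2, ?_⟩
    have : (l₁.zip l₂)[i]'hi = (l₁[i]'h1, l₂[i]'h2) := List.getElem_zip
    rw [List.getD_eq_getElem?_getD, List.getElem?_eq_getElem h1,
        List.getD_eq_getElem?_getD, List.getElem?_eq_getElem h2]
    simpa [this] using hP
  · rintro ⟨i, h1, h2, hP⟩
    have hi : i < (l₁.zip l₂).length := by simp [List.length_zip]; omega
    refine ⟨(l₁.zip l₂)[i]'hi, List.getElem_mem hi, ?_⟩
    have : (l₁.zip l₂)[i]'hi = (l₁[i]'h1, l₂[i]'h2) := List.getElem_zip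
    rw [this]
    rw [List.getD_eq_getElem?_getD, List.getElem?_eq_getElem h1,
        List.getD_eq_getElem?_getD, List.getElem?_eq_getElem h2] at hP
    exact hP

lemma getD_mem (l : List Int) (i : Nat) (h : i < l.length) : l.getD i 0 ∈ l := by
  rw [List.getD_eq_getElem?_getD, List.getElem?_eq_getElem h]
  exact List.getElem_mem h

lemma condJ_iff (ins exp : List Int) (s f j : Int) :
    condJ ins exp s f j = true ↔
      (PySem.List.pyGetD ins j 0 > s ∧ PySem.List.pyGetD ins j 0 < f) ∨
      (j < PySem.List.len exp ∧ PySem.List.pyGetD exp j 0 > s ∧ PySem.List.pyGetD exp j 0 < f) ∨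
      (j ≥ PySem.List.len exp ∧ PySem.List.pyGetD ins j 0 < s) ∨
      (j < PySem.List.len exp ∧ PySem.List.pyGetD ins j 0 < s ∧ PySem.List.pyGetD exp j 0 > s) := by
  simp only [condJ, Bool.or_eq_true, Bool.and_eq_true, Bool.not_eq_true',
    decide_eq_true_eq, decide_eq_false_iff_not]
  omega

lemma exists_condJ_iff (ins exp : List Int) (s f : Int) :
    (∃ j ∈ PySem.List.pyRange 0 (PySem.List.len ins), condJ ins exp s f j = true) ↔
      C1 ins s f ∨ C2 ins exp s f ∨ C3 ins exp s ∨ C4 ins exp s := by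
  constructor
  · rintro ⟨j, hj, hcj⟩
    rw [PySem.List.mem_pyRange_one] at hj
    obtain ⟨hj0, hjN⟩ := hj
    have hji : j = ((j.toNat : Nat) : Int) := by omega
    set i := j.toNat with hidef
    have hiN : i < ins.length := by simp only [PySem.List.len] at hjN; omega
    rw [hji, condJ_iff] at hcj
    simp only [PySem.List.pyGetD_natCast, PySem.List.len] at hcj
    rcases hcj with ⟨hgt, hlt⟩ | ⟨hje, hgt, hlt⟩ | ⟨hje, hlt⟩ | ⟨hje, hlt, hgt⟩
    · exact Or.inl ⟨ins.getD i 0, getD_mem ins i hiN, hgt, hlt⟩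
    · have hiE : i < exp.length := by omega
      exact Or.inr (Or.inl ((exists_mem_take exp ins.length _).mpr ⟨i, hiE, hiN, hgt, hlt⟩))
    · have hiE : exp.length ≤ i := by omega
      exact Or.inr (Or.inr (Or.inl ((exists_mem_drop ins exp.length _).mpr ⟨i, hiN, hiE, hlt⟩)))
    · have hiE : i < exp.length := by omega
      exact Or.inr (Or.inr (Or.inr ((exists_mem_zip ins exp _).mpr ⟨i, hiN, hiE, hlt, hgt⟩)))
  · have hmk : ∀ (i : Nat), i < ins.length → ((i : Int) ∈ PySem.List.pyRange 0 (PySem.List.len ins)) := by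
      intro i hi
      rw [PySem.List.mem_pyRange_one]
      simp only [PySem.List.len]
      omega
    rintro (⟨x, hx, hxs, hxf⟩ | hC | hC | hC)
    · rcases List.mem_iff_getElem.mp hx with ⟨i, hi, rfl⟩
      have hD : ins.getD i 0 = ins[i] := by
        rw [List.getD_eq_getElem?_getD, List.getElem?_eq_getElem hi]; rfl
      refine ⟨(i : Int), hmk i hi, ?_⟩
      rw [condJ_iff]
      simp only [PySem.List.pyGetD_natCast]
      exact Or.inl ⟨by omega, by omega⟩
    · rcases (exists_mem_take exp ins.length _).mp hC with ⟨i, hiE, hiN, hgt, hlt⟩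
      refine ⟨(i : Int), hmk i hiN, ?_⟩
      rw [condJ_iff]
      simp only [PySem.List.pyGetD_natCast, PySem.List.len]
      exact Or.inr (Or.inl ⟨by omega, hgt, hlt⟩)
    · rcases (exists_mem_drop ins exp.length _).mp hC with ⟨i, hiN, hiE, hlt⟩
      refine ⟨(i : Int), hmk i hiN, ?_⟩
      rw [condJ_iff]
      simp only [PySem.List.pyGetD_natCast, PySem.List.len]
      exact Or.inr (Or.inr (Or.inl ⟨by omega, hlt⟩))
    · rcases (exists_mem_zip ins exp _).mp hC with ⟨i, hiN, hiE, hlt, hgt⟩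
      refine ⟨(i : Int), hmk i hiN, ?_⟩
      rw [condJ_iff]
      simp only [PySem.List.pyGetD_natCast, PySem.List.len]
      exact Or.inr (Or.inr (Or.inr ⟨by omega, hlt, hgt⟩))

lemma sorted_getD_mono (a : List Int) (h : a.Pairwise (· ≤ ·)) (i j : Nat) (hij : i ≤ j)
    (hj : j < a.length) : a.getD i 0 ≤ a.getD j 0 := by
  rcases Nat.eq_or_lt_of_le hij with rfl | hlt
  · exact le_refl _
  · have := (List.pairwise_iff_getElem.mp h) i j (lt_trans hlt hj) hj hlt
    simpa [List.getD_eq_getElem?_getD, List.getElem?_eq_getElem, lt_trans hlt hj, hj] using this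

lemma bsr_spec (a : List Int) (x : Int) (lo hi : Nat) (hhi : hi ≤ a.length)
    (hle : lo ≤ hi) (hsort : a.Pairwise (· ≤ ·)) :
    lo ≤ bsr a x lo hi ∧ bsr a x lo hi ≤ hi ∧
    (∀ j, lo ≤ j → j < bsr a x lo hi → a.getD j 0 ≤ x) ∧
    (∀ j, bsr a x lo hi ≤ j → j < hi → x < a.getD j 0) := by
  fun_induction bsr a x lo hi with
  | case1 lo hi hlt mid hmid ih =>
    rw [PySem.List.pyGetD_natCast] at hmid
    rcases ih (by omega) (by omega) with ⟨i1, i2, i3, i4⟩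
    refine ⟨by omega, i2, ?_, i4⟩
    intro j hj1 hj2
    by_cases hjm : j < mid + 1
    · calc a.getD j 0 ≤ a.getD mid 0 := sorted_getD_mono a hsort j mid (by omega) (by omega)
        _ ≤ x := hmid
    · exact i3 j (by omega) hj2
  | case2 lo hi hlt mid hmid ih =>
    rw [PySem.List.pyGetD_natCast] at hmid
    rcases ih (by omega) (by omega) with ⟨i1, i2, i3, i4⟩
    refine ⟨i1, by omega, i3, ?_⟩
    intro j hj1 hj2
    by_cases hjm : j < mid
    · exact i4 j hj1 hjm
    · calc x < a.getD mid 0 := by omega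
        _ ≤ a.getD j 0 := sorted_getD_mono a hsort mid j (by omega) (by omega)
  | case3 lo hi hnlt =>
    exact ⟨le_refl _, by omega, by omega, by omega⟩

lemma bsl_spec (a : List Int) (x : Int) (lo hi : Nat) (hhi : hi ≤ a.length)
    (hle : lo ≤ hi) (hsort : a.Pairwise (· ≤ ·)) :
    lo ≤ bsl a x lo hi ∧ bsl a x lo hi ≤ hi ∧
    (∀ j, lo ≤ j → j < bsl a x lo hi → a.getD j 0 < x) ∧
    (∀ j, bsl a x lo hi ≤ j → j < hi → x ≤ a.getD j 0) := by
  fun_induction bsl a x lo hi with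
  | case1 lo hi hlt mid hmid ih =>
    rw [PySem.List.pyGetD_natCast] at hmid
    rcases ih (by omega) (by omega) with ⟨i1, i2, i3, i4⟩
    refine ⟨by omega, i2, ?_, i4⟩
    intro j hj1 hj2
    by_cases hjm : j < mid + 1
    · calc a.getD j 0 ≤ a.getD mid 0 := sorted_getD_mono a hsort j mid (by omega) (by omega)
        _ < x := hmid
    · exact i3 j (by omega) hj2
  | case2 lo hi hlt mid hmid ih =>
    rw [PySem.List.pyGetD_natCast] at hmid
    rcases ih (by omega) (by omega) with ⟨i1, i2, i3, i4⟩
    refine ⟨i1, by omega, i3, ?_⟩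
    intro j hj1 hj2
    by_cases hjm : j < mid
    · exact i4 j hj1 hjm
    · calc x ≤ a.getD mid 0 := by omega
        _ ≤ a.getD j 0 := sorted_getD_mono a hsort mid j (by omega) (by omega)
  | case3 lo hi hnlt =>
    exact ⟨le_refl _, by omega, by omega, by omega⟩

lemma hasBetween_iff (a : List Int) (s f : Int) (hsort : a.Pairwise (· ≤ ·)) :
    hasBetween a s f = true ↔ ∃ x ∈ a, s < x ∧ x < f := by
  unfold hasBetween
  rcases bsr_spec a s 0 a.length (le_refl _) (Nat.zero_le _) hsort with ⟨-, h2, h3, h4⟩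
  constructor
  · intro h
    simp only [Bool.and_eq_true, decide_eq_true_eq] at h
    obtain ⟨hlt, hvf⟩ := h
    rw [PySem.List.pyGetD_natCast] at hvf
    exact ⟨a.getD (bsr a s 0 a.length) 0, getD_mem a _ hlt,
      h4 _ (le_refl _) hlt, hvf⟩
  · rintro ⟨x, hx, hsx, hxf⟩
    rcases List.mem_iff_getElem.mp hx with ⟨j, hj, rfl⟩
    have hjD : a.getD j 0 = a[j] := by
      rw [List.getD_eq_getElem?_getD, List.getElem?_eq_getElem hj]; rfl
    have hrj : bsr a s 0 a.length ≤ j := by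
      by_contra hc
      push_neg at hc
      have := h3 j (Nat.zero_le _) hc
      rw [hjD] at this
      omega
    have hrlen : bsr a s 0 a.length < a.length := lt_of_le_of_lt hrj hj
    simp only [Bool.and_eq_true, decide_eq_true_eq]
    refine ⟨hrlen, ?_⟩
    rw [PySem.List.pyGetD_natCast]
    have := sorted_getD_mono a hsort _ j hrj hj
    rw [hjD] at this
    omega

lemma runMaxGo_some_spec (l : List (Int × Int)) (c : Int) (k : Nat) (hk : k < l.length) :
    ((runMaxGo (some c) l).getD k 0 = c ∨
      ∃ p ∈ l.take (k + 1), p.2 = (runMaxGo (some c) l).getD k 0) ∧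
    c ≤ (runMaxGo (some c) l).getD k 0 ∧
    (∀ p ∈ l.take (k + 1), p.2 ≤ (runMaxGo (some c) l).getD k 0) := by
  induction l generalizing c k with
  | nil => simp at hk
  | cons p r ih =>
    by_cases hpc : p.2 > c
    · have hrw : runMaxGo (some c) (p :: r) = p.2 :: runMaxGo (some p.2) r := by
        simp [runMaxGo, hpc]
      cases k with
      | zero =>
        refine ⟨Or.inr ⟨p, by simp, by simp [hrw]⟩, by simp [hrw]; omega, ?_⟩
        intro q hq; simp at hq; simp [hrw, hq]
      | succ k =>
        have hk' : k < r.length := by simp at hk; omega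
        rcases ih p.2 k hk' with ⟨m1, m2, m3⟩
        have hget : (runMaxGo (some c) (p :: r)).getD (k + 1) 0
            = (runMaxGo (some p.2) r).getD k 0 := by simp [hrw]
        refine ⟨?_, by rw [hget]; omega, ?_⟩
        · rcases m1 with h | ⟨q, hq, hq2⟩
          · exact Or.inr ⟨p, by simp, by rw [hget, h]⟩
          · exact Or.inr ⟨q, by simp [List.take_succ_cons]; exact Or.inr hq, by rw [hget, hq2]⟩
        · intro q hq
          rw [hget]
          rcases (by simpa [List.take_succ_cons] using hq : q = p ∨ q ∈ r.take (k + 1)) with rfl | hq'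
          · omega
          · exact m3 q hq'
    · have hrw : runMaxGo (some c) (p :: r) = c :: runMaxGo (some c) r := by
        simp [runMaxGo, hpc]
      cases k with
      | zero =>
        refine ⟨Or.inl (by simp [hrw]), by simp [hrw], ?_⟩
        intro q hq; simp at hq; simp [hrw, hq]; omega
      | succ k =>
        have hk' : k < r.length := by simp at hk; omega
        rcases ih c k hk' with ⟨m1, m2, m3⟩
        have hget : (runMaxGo (some c) (p :: r)).getD (k + 1) 0
            = (runMaxGo (some c) r).getD k 0 := by simp [hrw]
        refine ⟨?_, by rw [hget]; omega, ?_⟩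
        · rcases m1 with h | ⟨q, hq, hq2⟩
          · exact Or.inl (by rw [hget, h])
          · exact Or.inr ⟨q, by simp [List.take_succ_cons]; exact Or.inr hq, by rw [hget, hq2]⟩
        · intro q hq
          rw [hget]
          rcases (by simpa [List.take_succ_cons] using hq : q = p ∨ q ∈ r.take (k + 1)) with rfl | hq'
          · omega
          · exact m3 q hq'

lemma runMaxGo_none_spec (l : List (Int × Int)) (k : Nat) (hk : k < l.length) :
    (∃ p ∈ l.take (k + 1), p.2 = (runMaxGo none l).getD k 0) ∧
    (∀ p ∈ l.take (k + 1), p.2 ≤ (runMaxGo none l).getD k 0) := by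
  cases l with
  | nil => simp at hk
  | cons p r =>
    have hrw : runMaxGo none (p :: r) = p.2 :: runMaxGo (some p.2) r := by simp [runMaxGo]
    cases k with
    | zero => refine ⟨⟨p, by simp, by simp [hrw]⟩, ?_⟩
              intro q hq; simp at hq; simp [hrw, hq]
    | succ k =>
      have hk' : k < r.length := by simp at hk; omega
      rcases runMaxGo_some_spec r p.2 k hk' with ⟨m1, m2, m3⟩
      have hget : (runMaxGo none (p :: r)).getD (k + 1) 0
          = (runMaxGo (some p.2) r).getD k 0 := by simp [hrw]
      refine ⟨?_, ?_⟩
      · rcases m1 with h | ⟨q, hq, hq2⟩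
        · exact ⟨p, by simp, by rw [hget, h]⟩
        · exact ⟨q, by simp [List.take_succ_cons]; exact Or.inr hq, by rw [hget, hq2]⟩
      · intro q hq
        rw [hget]
        rcases (by simpa [List.take_succ_cons] using hq : q = p ∨ q ∈ r.take (k + 1)) with rfl | hq'
        · exact m2
        · exact m3 q hq'

lemma c4_iff (pairs : List (Int × Int)) (s : Int)
    (hsort : (pairs.map (fun p => p.1)).Pairwise (· ≤ ·)) :
    (0 < bsl (pairs.map (fun p => p.1)) s 0 (pairs.map (fun p => p.1)).length ∧
      PySem.List.pyGetD (runMaxGo none pairs)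
        ((bsl (pairs.map (fun p => p.1)) s 0 (pairs.map (fun p => p.1)).length : Int) - 1) 0 > s)
    ↔ ∃ p ∈ pairs, p.1 < s ∧ s < p.2 := by
  rcases bsl_spec (pairs.map (fun p => p.1)) s 0 _ (le_refl _) (Nat.zero_le _) hsort with
    ⟨-, h2, h3, h4⟩
  set F := pairs.map (fun p => p.1) with hF
  set k := bsl F s 0 F.length with hk
  have hlenF : F.length = pairs.length := by simp [hF]
  have hFi : ∀ (i : Nat) (h : i < pairs.length), F.getD i 0 = (pairs[i]'h).1 := by
    intro i h
    rw [hF, List.getD_eq_getElem?_getD, List.getElem?_map, List.getElem?_eq_getElem h]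
    rfl
  constructor
  · rintro ⟨hk0, hpm⟩
    have hcast : ((k : Int) - 1) = ((k - 1 : Nat) : Int) := by omega
    rw [hcast, PySem.List.pyGetD_natCast] at hpm
    have hkp : k - 1 < pairs.length := by omega
    rcases runMaxGo_none_spec pairs (k - 1) hkp with ⟨⟨q, hq, hq2⟩, -⟩
    rw [show k - 1 + 1 = k from by omega] at hq
    rcases List.mem_iff_getElem.mp hq with ⟨i, hi, rfl⟩
    have hik : i < k := lt_of_lt_of_le hi (by simp [List.length_take])
    have hip : i < pairs.length := lt_of_lt_of_le hi (by simp [List.length_take])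
    have hgt : (pairs.take k)[i]'hi = pairs[i]'hip := List.getElem_take
    refine ⟨pairs[i], List.getElem_mem hip, ?_, ?_⟩
    · have := h3 i (Nat.zero_le _) hik
      rw [hFi i hip] at this
      exact this
    · rw [hgt] at hq2
      omega
  · rintro ⟨p, hp, hp1, hp2⟩
    rcases List.mem_iff_getElem.mp hp with ⟨i, hip, rfl⟩
    have hik : i < k := by
      by_contra hc
      push_neg at hc
      have := h4 i hc (by omega : i < F.length)
      rw [hFi i hip] at this
      omega
    have hk0 : 0 < k := by omega
    refine ⟨hk0, ?_⟩
    have hcast : ((k : Int) - 1) = ((k - 1 : Nat) : Int) := by omega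
    rw [hcast, PySem.List.pyGetD_natCast]
    have hkp : k - 1 < pairs.length := by omega
    rcases runMaxGo_none_spec pairs (k - 1) hkp with ⟨-, hub⟩
    have hmem : pairs[i] ∈ pairs.take (k - 1 + 1) := by
      rw [show k - 1 + 1 = k from by omega]
      exact List.mem_iff_getElem.mpr ⟨i, by simp [List.length_take]; omega, List.getElem_take⟩
    have := hub _ hmem
    omega

lemma tailMin_iff (tail : List Int) (s : Int) :
    ((if tail = [] then none else PySem.List.min? tail (fun x => x)).isSome ∧
      (if tail = [] then none else PySem.List.min? tail (fun x => x)).getD 0 < s) ↔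
    ∃ x ∈ tail, x < s := by
  by_cases h : tail = []
  · simp [h]
  · rcases hm : PySem.List.min? tail (fun x => x) with _ | m
    · exact absurd ((PySem.List.min?_eq_none_iff tail _).mp hm) h
    · rw [if_neg h]
      simp only [Option.isSome_some, Option.getD_some, true_and]
      constructor
      · intro hms; exact ⟨m, PySem.List.min?_mem hm, hms⟩
      · rintro ⟨x, hx, hxs⟩
        have h2 : m ≤ x := PySem.List.min?_isMin hm x hx
        omega

lemma aInner_iff (ins exp : List Int) (s f : Int) :
    aInner ins exp s f = true ↔
      ¬(C1 ins s f ∨ C2 ins exp s f ∨ C3 ins exp s ∨ C4 ins exp s) := by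
  rw [aInner_eq_all, List.all_eq_true, ← exists_condJ_iff ins exp s f]
  constructor
  · rintro h ⟨j, hj, hcj⟩
    have := h j hj; simp [hcj] at this
  · intro h j hj
    simp only [Bool.not_eq_eq_eq_not, Bool.not_true]
    by_contra hc
    exact h ⟨j, hj, by simpa using hc⟩

lemma aOuter_eq_aux (ins exp starts fins : List Int) :
    ∀ (d a : Nat) (acc : List Int), starts.length ≤ a + d →
    aOuter ins exp starts fins (PySem.List.pyRange (a : Int) (PySem.List.len starts)) acc
      = acc ++ (((starts.drop a).zip (fins.drop a)).filter
          (fun p => aInner ins exp p.1 p.2)).map Prod.fst := by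
  intro d
  induction d with
  | zero =>
    intro a acc h
    rw [PySem.List.pyRange_one_eq_nil (by simp [PySem.List.len]; omega)]
    have h1 : starts.drop a = [] := List.drop_eq_nil_of_le (by omega)
    simp [aOuter, h1]
  | succ d ih =>
    intro a acc h
    by_cases ha : starts.length ≤ a
    · rw [PySem.List.pyRange_one_eq_nil (by simp [PySem.List.len]; omega)]
      have h1 : starts.drop a = [] := List.drop_eq_nil_of_le ha
      simp [aOuter, h1]
    · push_neg at ha
      rw [PySem.List.pyRange_one_cons (by simp [PySem.List.len]; omega)]
      show (if (a : Int) ≥ PySem.List.len fins then acc else _) = _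
      by_cases hf : (a : Int) ≥ PySem.List.len fins
      · rw [if_pos hf]
        have h2 : fins.drop a = [] :=
          List.drop_eq_nil_of_le (show fins.length ≤ a by
            simp only [PySem.List.len, ge_iff_le] at hf; omega)
        simp [h2]
      · rw [if_neg hf]
        simp only [PySem.List.len, ge_iff_le, not_le] at hf
        have hfa : a < fins.length := by omega
        have hs : PySem.List.pyGetD starts (a : Int) 0 = starts[a] := by
          rw [PySem.List.pyGetD_natCast, List.getD_eq_getElem?_getD, List.getElem?_eq_getElem ha]
          rfl
        have hfg : PySem.List.pyGetD fins (a : Int) 0 = fins[a] := by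
          rw [PySem.List.pyGetD_natCast, List.getD_eq_getElem?_getD, List.getElem?_eq_getElem hfa]
          rfl
        have hds : starts.drop a = starts[a] :: starts.drop (a + 1) :=
          List.drop_eq_getElem_cons ha
        have hdf : fins.drop a = fins[a] :: fins.drop (a + 1) :=
          List.drop_eq_getElem_cons hfa
        have hcast : (a : Int) + 1 = ((a + 1 : Nat) : Int) := by push_cast; ring
        rw [hs, hfg, hcast, ih (a + 1) _ (by omega), hds, hdf, List.zip_cons_cons,
          List.filter_cons]
        by_cases hdet : aInner ins exp starts[a] fins[a] = true
        · rw [hdet]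
          simp
        · simp only [Bool.not_eq_true] at hdet
          rw [hdet]
          simp

lemma find_A_eq_filter (ins exp starts fins : List Int) :
    find_ineffective_effort ins exp starts fins
      = ((starts.zip fins).filter (fun p => aInner ins exp p.1 p.2)).map Prod.fst := by
  have := aOuter_eq_aux ins exp starts fins starts.length 0 [] (by omega)
  simpa [find_ineffective_effort] using this

lemma body_eq (s1 s2 : List Int) (tm : Option Int) (fs pm : List Int) (out : List Int) (x y : Int) :
    (if hasBetween s1 x y then out
     else if hasBetween s2 x y then out
     else if tm.isSome ∧ tm.getD 0 < x then out
     else if 0 < bsl fs x 0 fs.length ∧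
         PySem.List.pyGetD pm ((bsl fs x 0 fs.length : Int) - 1) 0 > x then out
     else out ++ [x])
    = if bAccept s1 s2 tm fs pm x y then out ++ [x] else out := by
  unfold bAccept
  cases h1 : hasBetween s1 x y <;> cases h2 : hasBetween s2 x y <;>
    by_cases h3 : tm.isSome ∧ tm.getD 0 < x <;>
    by_cases h4 : 0 < bsl fs x 0 fs.length ∧
      PySem.List.pyGetD pm ((bsl fs x 0 fs.length : Int) - 1) 0 > x <;>
    simp [h3, h4]

set_option maxHeartbeats 2000000 in
lemma find_B_eq_filter (ins exp starts fins : List Int) :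
    find_ineffective_effort_alt ins exp starts fins
      = ((starts.zip fins).filter (fun p =>
          bAccept (PySem.List.sorted ins (fun x => x) false)
            (PySem.List.sorted (PySem.List.slice exp none (some (ins.length : Int))) (fun x => x) false)
            (if PySem.List.slice ins (some (exp.length : Int)) none = [] then none
              else PySem.List.min? (PySem.List.slice ins (some (exp.length : Int)) none) (fun x => x))
            ((PySem.List.sorted (ins.zip exp) (fun p => p.1) false).map (fun p => p.1))
            (runMaxGo none (PySem.List.sorted (ins.zip exp) (fun p => p.1) false))
            p.1 p.2)).map Prod.fst := by
  unfold find_ineffective_effort_alt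
  simp only []
  rw [PySem.List.foldl_congr_mem _ _ (fun out p =>
    if bAccept (PySem.List.sorted ins (fun x => x) false)
        (PySem.List.sorted (PySem.List.slice exp none (some (ins.length : Int))) (fun x => x) false)
        (if PySem.List.slice ins (some (exp.length : Int)) none = [] then none
          else PySem.List.min? (PySem.List.slice ins (some (exp.length : Int)) none) (fun x => x))
        ((PySem.List.sorted (ins.zip exp) (fun p => p.1) false).map (fun p => p.1))
        (runMaxGo none (PySem.List.sorted (ins.zip exp) (fun p => p.1) false))
        p.1 p.2 = true then out ++ [p.1] else out) []
    (by intro acc p _; exact body_eq _ _ _ _ _ acc p.1 p.2)]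
  rw [PySem.List.foldl_append_if]
  simp

-- ===== VERDICT (by name: the statement is the Claim_ definition above) =====
set_option maxHeartbeats 4000000 in
theorem find_ineffective_effort_spec : Claim_equal_find_ineffective_effort := by
  intro ins exp starts fins _
  unfold Spec_find_ineffective_effort
  rw [find_A_eq_filter, find_B_eq_filter]
  congr 1
  apply List.filter_congr
  intro p _
  have hA := aInner_iff ins exp p.1 p.2
  have hsort1 : (PySem.List.sorted ins (fun x => x) false).Pairwise (· ≤ ·) := by
    simpa using PySem.List.sorted_pairwise ins (fun x => x)
  have hsort2 : (PySem.List.sorted (PySem.List.slice exp none (some (ins.length : Int)))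
      (fun x => x) false).Pairwise (· ≤ ·) := by
    simpa using PySem.List.sorted_pairwise
      (PySem.List.slice exp none (some (ins.length : Int))) (fun x => x)
  have h1 : hasBetween (PySem.List.sorted ins (fun x => x) false) p.1 p.2 = true ↔
      C1 ins p.1 p.2 := by
    rw [hasBetween_iff _ _ _ hsort1]
    unfold C1
    simp only [PySem.List.mem_sorted]
  have h2 : hasBetween (PySem.List.sorted (PySem.List.slice exp none (some (ins.length : Int)))
      (fun x => x) false) p.1 p.2 = true ↔ C2 ins exp p.1 p.2 := by
    rw [hasBetween_iff _ _ _ hsort2]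
    unfold C2
    simp only [PySem.List.mem_sorted, PySem.List.slice_to_natCast]
  have h3 : ((if PySem.List.slice ins (some (exp.length : Int)) none = [] then none
      else PySem.List.min? (PySem.List.slice ins (some (exp.length : Int)) none) (fun x => x)).isSome ∧
      (if PySem.List.slice ins (some (exp.length : Int)) none = [] then none
      else PySem.List.min? (PySem.List.slice ins (some (exp.length : Int)) none) (fun x => x)).getD 0 < p.1) ↔
      C3 ins exp p.1 := by
    rw [tailMin_iff]
    unfold C3
    simp only [PySem.List.slice_from_natCast]
  have h4 : (0 < bsl ((PySem.List.sorted (ins.zip exp) (fun q => q.1) false).map (fun q => q.1)) p.1 0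
        ((PySem.List.sorted (ins.zip exp) (fun q => q.1) false).map (fun q => q.1)).length ∧
      PySem.List.pyGetD (runMaxGo none (PySem.List.sorted (ins.zip exp) (fun q => q.1) false))
        ((bsl ((PySem.List.sorted (ins.zip exp) (fun q => q.1) false).map (fun q => q.1)) p.1 0
          ((PySem.List.sorted (ins.zip exp) (fun q => q.1) false).map (fun q => q.1)).length : Int) - 1) 0 > p.1) ↔
      C4 ins exp p.1 := by
    rw [c4_iff _ _ (PySem.List.sorted_map_key_pairwise (ins.zip exp) (fun q => q.1))]
    unfold C4
    simp only [PySem.List.mem_sorted]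
  have hA := aInner_iff ins exp p.1 p.2
  rw [Bool.eq_iff_iff, hA]
  unfold bAccept
  simp only [Bool.and_eq_true, Bool.not_eq_true', Bool.eq_false_iff, Ne,
    decide_eq_true_eq, and_assoc]
  rw [h1, h2, h3, h4]
  tauto
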